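-- pv_equiv track=rewrite | github.com/pypi-data/pypi-mirror-163 | packages/templ8.py/templ8.py-0.1.0b25-py3-none-any.whl/templ8/blessing.py | get_charpos
-- ===== SOURCE A (Python) =====
-- def get_charpos(i, str):
-- 	lines = str.splitlines()
-- 	last_pos = 0
-- 	for j in range(len(lines)):
-- 		last_pos += len(lines[j])
-- 		if last_pos > i:
-- 			last_pos -= len(lines[j])
-- 			return (j + 1, i-last_pos-j+1)
-- ===== SOURCE B (Python) =====
-- def get_charpos(i, str):
--     lines = str.splitlines()
--     ends = []
--     total = 0
--     for ln in lines:
--         total += len(ln)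
--         ends.append(total)
--     # binary search: smallest j with ends[j] > i (ends is nondecreasing)
--     lo, hi = 0, len(ends)
--     while lo < hi:
--         mid = (lo + hi) // 2
--         if ends[mid] > i:
--             hi = mid
--         else:
--             lo = mid + 1
--     if lo == len(ends):
--         return None
--     return (lo + 1, i - (ends[lo] - len(lines[lo])) - lo + 1)
-- ===== Notes on version B (the rewrite author's own statement) =====
-- stated objective: alternative
-- what changed: A's single accumulating scan with early return is replaced by building an explicit prefix-sum table of line lengths and locating the line with a hand-written binary search (lower bound for 'cumulative length > i').
import Mathlib
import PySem

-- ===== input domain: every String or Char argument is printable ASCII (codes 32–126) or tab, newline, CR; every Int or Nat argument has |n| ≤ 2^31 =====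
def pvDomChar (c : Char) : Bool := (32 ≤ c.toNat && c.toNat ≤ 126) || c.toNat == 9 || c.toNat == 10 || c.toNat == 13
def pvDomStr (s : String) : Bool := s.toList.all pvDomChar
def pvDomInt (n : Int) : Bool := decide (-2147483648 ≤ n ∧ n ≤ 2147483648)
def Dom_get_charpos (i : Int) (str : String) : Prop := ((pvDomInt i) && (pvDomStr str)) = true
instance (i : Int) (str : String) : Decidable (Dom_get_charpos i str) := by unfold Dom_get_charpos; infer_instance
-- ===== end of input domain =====

-- B replaces A's accumulating scan by a prefix-sum table plus a binary search (alternative decomposition, not claimed faster).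

-- ===== PORT A =====
-- the for-loop over lines with accumulators last_pos and j (early return on last_pos > i)
def goA (i : Int) : List String → Int → Int → Option (Int × Int)
  | [], _, _ => none
  | ln :: rest, last_pos, j =>
    let lp := last_pos + (PySem.Str.len ln : Int)
    if lp > i then some (j + 1, i - last_pos - j + 1)
    else goA i rest lp (j + 1)

def get_charpos (i : Int) (str : String) : Option (Int × Int) :=
  goA i (PySem.Str.splitlines str) 0 0

-- ===== PORT B =====
-- ends.append(total) loop of Source B
def endsOf (lines : List String) : List Int :=
  (lines.foldl (fun (p : List Int × Int) ln =>
      let t := p.2 + (PySem.Str.len ln : Int)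
      (p.1 ++ [t], t)) ([], 0)).1

-- the while-loop binary search of Source B: smallest j with ends[j] > i
def bsearch (ends : List Int) (i : Int) (lo hi : Nat) : Nat :=
  if h : lo < hi then
    let mid := (lo + hi) / 2
    if i < ends.getD mid 0 then bsearch ends i lo mid
    else bsearch ends i (mid + 1) hi
  else lo
termination_by hi - lo
decreasing_by all_goals omega

def get_charpos_alt (i : Int) (str : String) : Option (Int × Int) :=
  let lines := PySem.Str.splitlines str
  let ends := endsOf lines
  let lo := bsearch ends i 0 ends.length
  if lo = ends.length then none
  else some ((lo : Int) + 1,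
    i - (ends.getD lo 0 - (PySem.Str.len (lines.getD lo "") : Int)) - (lo : Int) + 1)

-- ===== PRECONDITION & SPEC =====
def Spec_get_charpos (i : Int) (str : String) (out : Option (Int × Int)) : Prop := out = get_charpos_alt i str
instance (i : Int) (str : String) (out : Option (Int × Int)) : Decidable (Spec_get_charpos i str out) := by unfold Spec_get_charpos; infer_instance

-- ===== CLAIM (what is proved, stated in full; the proofs are below) =====
def Claim_equal_get_charpos : Prop := ∀ (i : Int) (str : String), Dom_get_charpos i str → Spec_get_charpos i str (get_charpos i str)

-- ===== LEMMAS AND PROOFS =====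

-- reference prefix-sum list
def scanE (t : Int) : List String → List Int
  | [] => []
  | ln :: rest => (t + (PySem.Str.len ln : Int)) :: scanE (t + (PySem.Str.len ln : Int)) rest

theorem endsOf_foldl (lines : List String) : ∀ (acc : List Int) (t : Int),
    ((lines.foldl (fun (p : List Int × Int) ln =>
      let t := p.2 + (PySem.Str.len ln : Int)
      (p.1 ++ [t], t)) (acc, t))).1 = acc ++ scanE t lines := by
  induction lines with
  | nil => intro acc t; simp [scanE]
  | cons ln rest ih =>
    intro acc t
    simp only [List.foldl_cons, scanE]
    rw [ih]
    simp

theorem endsOf_eq (lines : List String) : endsOf lines = scanE 0 lines := by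
  have := endsOf_foldl lines [] 0
  simpa [endsOf] using this

theorem scanE_length (t : Int) (lines : List String) : (scanE t lines).length = lines.length := by
  induction lines generalizing t with
  | nil => simp [scanE]
  | cons ln rest ih => simp [scanE, ih]

theorem scanE_ge (t : Int) (lines : List String) : ∀ e ∈ scanE t lines, t ≤ e := by
  induction lines generalizing t with
  | nil => simp [scanE]
  | cons ln rest ih =>
    intro e he
    have hL : (0:Int) ≤ (PySem.Str.len ln : Int) := Int.natCast_nonneg _
    simp only [scanE, List.mem_cons] at he
    rcases he with rfl | he
    · omega
    · have := ih (t + (PySem.Str.len ln : Int)) e he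
      omega

theorem scanE_pairwise (t : Int) (lines : List String) : (scanE t lines).Pairwise (· ≤ ·) := by
  induction lines generalizing t with
  | nil => simp [scanE]
  | cons ln rest ih =>
    simp only [scanE, List.pairwise_cons]
    exact ⟨fun e he => scanE_ge _ _ e he, ih _⟩

theorem findIdx_len_of_all (l : List Int) (p : Int → Bool) (h : ∀ x ∈ l, p x = false) :
    l.findIdx p = l.length := by
  induction l with
  | nil => simp
  | cons a r ih =>
    have ha : p a = false := h a (by simp)
    simp [List.findIdx_cons, ha, ih fun x hx => h x (by simp [hx])]

theorem findIdx_char (l : List Int) (p : Int → Bool) (r : Nat) (hr : r ≤ l.length)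
    (hlow : ∀ k, k < r → p (l.getD k 0) = false)
    (hhigh : ∀ k, r ≤ k → k < l.length → p (l.getD k 0) = true) : l.findIdx p = r := by
  rcases Nat.lt_or_ge r l.length with h | h
  · rw [List.findIdx_eq h]
    refine ⟨?_, fun j hj => ?_⟩
    · have := hhigh r (Nat.le_refl r) h
      rwa [List.getD_eq_getElem l 0 h] at this
    · have := hlow j hj
      rwa [List.getD_eq_getElem l 0 (by omega)] at this
  · have hr' : r = l.length := by omega
    subst hr'
    refine findIdx_len_of_all l p fun x hx => ?_
    obtain ⟨k, hk, rfl⟩ := List.mem_iff_getElem.mp hx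
    have := hlow k hk
    rwa [List.getD_eq_getElem l 0 hk] at this

-- A's loop computes the first index whose prefix sum exceeds i
theorem goA_eq (i : Int) (lines : List String) : ∀ (lp : Int) (j : Int),
    goA i lines lp j =
      (let ends := scanE lp lines
       let k := ends.findIdx (fun e => decide (i < e))
       if k < lines.length then
         some (j + (k : Int) + 1, i - (ends.getD k 0 - (PySem.Str.len (lines.getD k "") : Int)) - (j + (k : Int)) + 1)
       else none) := by
  induction lines with
  | nil => intro lp j; simp [goA, scanE]
  | cons ln rest ih =>
    intro lp j
    simp only [scanE]
    by_cases h : i < lp + (PySem.Str.len ln : Int)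
    · have hgo : goA i (ln :: rest) lp j = some (j + 1, i - lp - j + 1) := by
        simp only [goA]
        rw [if_pos h]
      rw [hgo]
      simp only [List.findIdx_cons, h, decide_true, cond_true, List.length_cons,
        List.getD_cons_zero, Nat.cast_zero]
      rw [if_pos (by omega)]
      simp only [Option.some.injEq, Prod.mk.injEq]
      exact ⟨by ring, by push_cast; ring⟩
    · have hgo : goA i (ln :: rest) lp j = goA i rest (lp + (PySem.Str.len ln : Int)) (j + 1) := by
        simp only [goA]
        rw [if_neg h]
      rw [hgo, ih]
      simp only [List.findIdx_cons, h, decide_false, cond_false, List.length_cons,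
        List.getD_cons_succ]
      by_cases hk : (scanE (lp + (PySem.Str.len ln : Int)) rest).findIdx (fun e => decide (i < e)) < rest.length
      · rw [if_pos hk, if_pos (by omega)]
        simp only [Option.some.injEq, Prod.mk.injEq]
        exact ⟨by push_cast; ring, by push_cast; ring⟩
      · rw [if_neg hk, if_neg (by omega)]

-- binary search with a monotone predicate returns findIdx
theorem bsearch_eq (ends : List Int) (i : Int)
    (mono : ∀ k l, k ≤ l → l < ends.length → i < ends.getD k 0 → i < ends.getD l 0) :
    ∀ d lo hi, hi - lo ≤ d → lo ≤ hi → hi ≤ ends.length →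
      (∀ k, k < lo → ¬ i < ends.getD k 0) →
      (∀ k, hi ≤ k → k < ends.length → i < ends.getD k 0) →
      bsearch ends i lo hi = ends.findIdx (fun e => decide (i < e)) := by
  intro d
  induction d with
  | zero =>
    intro lo hi hd hle hhi hlow hhigh
    have : lo = hi := by omega
    subst this
    rw [bsearch, dif_neg (by omega)]
    refine (findIdx_char _ _ lo (by omega) (fun k hk => ?_) (fun k hk1 hk2 => ?_)).symm
    · simpa using hlow k hk
    · simpa using hhigh k hk1 hk2
  | succ d ih =>
    intro lo hi hd hle hhi hlow hhigh
    by_cases h : lo < hi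
    · rw [bsearch, dif_pos h]
      simp only
      by_cases hm : i < ends.getD ((lo + hi) / 2) 0
      · rw [if_pos hm]
        exact ih lo ((lo + hi) / 2) (by omega) (by omega) (by omega) hlow
          (fun k hk1 hk2 => mono ((lo + hi) / 2) k hk1 hk2 hm)
      · rw [if_neg hm]
        refine ih ((lo + hi) / 2 + 1) hi (by omega) (by omega) hhi (fun k hk => ?_) hhigh
        intro hik
        exact hm (mono k ((lo + hi) / 2) (by omega) (by omega) hik)
    · have : lo = hi := by omega
      subst this
      rw [bsearch, dif_neg (by omega)]
      refine (findIdx_char _ _ lo (by omega) (fun k hk => ?_) (fun k hk1 hk2 => ?_)).symm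
      · simpa using hlow k hk
      · simpa using hhigh k hk1 hk2

-- ===== VERDICT (by name: the statement is the Claim_ definition above) =====
theorem get_charpos_spec : Claim_equal_get_charpos := by
  intro i str _
  unfold Spec_get_charpos get_charpos get_charpos_alt
  dsimp only
  set lines := PySem.Str.splitlines str with hlines
  rw [endsOf_eq, goA_eq]
  set ends := scanE 0 lines with hends
  have hlen : ends.length = lines.length := scanE_length 0 lines
  have hpw : List.Pairwise (· ≤ ·) ends := by rw [hends]; exact scanE_pairwise 0 lines
  have mono : ∀ k l, k ≤ l → l < ends.length → i < ends.getD k 0 → i < ends.getD l 0 := by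
    intro k l hkl hl hik
    rcases Nat.eq_or_lt_of_le hkl with rfl | hkl'
    · exact hik
    · rw [List.pairwise_iff_getElem] at hpw
      have := hpw k l (by omega) hl hkl'
      rw [List.getD_eq_getElem ends 0 (by omega)] at hik
      rw [List.getD_eq_getElem ends 0 hl]
      omega
  have hb := bsearch_eq ends i mono ends.length 0 ends.length (by omega) (by omega) (by omega)
    (by omega) (by omega)
  rw [hb]
  set k := ends.findIdx (fun e => decide (i < e)) with hk
  have hkle : k ≤ ends.length := List.findIdx_le_length
  by_cases hlt : k < lines.length
  · rw [if_pos hlt, if_neg (by omega)]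
    simp only [Option.some.injEq, Prod.mk.injEq]
    exact ⟨by push_cast; ring, by push_cast; ring⟩
  · rw [if_neg hlt, if_pos (by omega)]
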